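-- pv_equiv track=rewrite | github.com/Danny-Yxzl/netdisk-server | root/main.py | folder_name_format
-- ===== SOURCE A (Python) =====
-- def folder_name_format(folder_name) -> str:
--     # 将文件夹格式改为 "a/b/" 或 "" ： 这样在使用时可以最小化改动template，同时统一格式易于管理
--     if not folder_name:
--         return ""
--     if folder_name[-1] != "/":
--         folder_name = folder_name + "/"
--     if folder_name != "/":
--         while "//" in folder_name:
--             folder_name = folder_name.replace("//", "/")
--         while folder_name[0] == "/":
--             folder_name = folder_name[1:]
--             if not len(folder_name):
--                 return ""
--         return folder_name
--     else:
--         return ""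
-- ===== SOURCE B (Python) =====
-- def folder_name_format(folder_name) -> str:
--     # simpler: one split/filter/join pass instead of repeated replace/slice mutation
--     if not folder_name:
--         return ""
--     parts = [p for p in folder_name.split("/") if p]
--     return "/".join(parts) + "/" if parts else ""
-- ===== Notes on version B (the rewrite author's own statement) =====
-- stated objective: simpler
-- what changed: Replaces A's repeated double-slash collapse loop plus leading-slash stripping loop with a single split-on-slash, drop-empty-segments, join pass.
import Mathlib
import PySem

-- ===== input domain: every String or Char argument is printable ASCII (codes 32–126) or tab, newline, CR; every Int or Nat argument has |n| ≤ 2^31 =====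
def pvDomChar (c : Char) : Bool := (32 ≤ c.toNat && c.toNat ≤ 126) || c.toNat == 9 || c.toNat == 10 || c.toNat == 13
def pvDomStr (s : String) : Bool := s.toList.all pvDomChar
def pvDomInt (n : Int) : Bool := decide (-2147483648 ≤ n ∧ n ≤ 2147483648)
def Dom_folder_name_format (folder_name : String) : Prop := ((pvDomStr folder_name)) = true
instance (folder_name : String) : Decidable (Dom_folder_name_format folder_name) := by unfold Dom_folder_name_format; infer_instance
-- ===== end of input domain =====

-- B replaces A's repeated double-slash collapse loop and leading-slash stripping with one split/filter/join pass (objective: simpler).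

-- ===== PORT A =====
-- proof-level model of one pass of the double-slash replace; needed above the port to justify the while loop's termination
def pvRep : List Char → List Char
  | [] => []
  | [c] => [c]
  | c :: d :: t => if c = '/' ∧ d = '/' then '/' :: pvRep t else c :: pvRep (d :: t)

-- two adjacent slashes occur in l
def pvHasDD : List Char → Bool
  | c :: d :: t => (decide (c = '/') && decide (d = '/')) || pvHasDD (d :: t)
  | _ => false

theorem pvRep_len_le (l : List Char) : (pvRep l).length ≤ l.length := by
  induction l using pvRep.induct with
  | case1 => simp [pvRep]
  | case2 c => simp [pvRep]
  | case3 c d t h ih => simp only [pvRep, if_pos h, List.length_cons]; omega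
  | case4 c d t h ih =>
      simp only [pvRep, if_neg h, List.length_cons]
      simp only [List.length_cons] at ih
      omega

theorem pvRep_shrink (l : List Char) (hdd : pvHasDD l = true) : (pvRep l).length < l.length := by
  induction l using pvRep.induct with
  | case1 => simp [pvHasDD] at hdd
  | case2 c => simp [pvHasDD] at hdd
  | case3 c d t h ih =>
      simp only [pvRep, if_pos h, List.length_cons]
      have := pvRep_len_le t; omega
  | case4 c d t h ih =>
      have hdd' : pvHasDD (d :: t) = true := by
        rcases Decidable.not_and_iff_or_not.mp h with hc | hc <;>
          simpa [pvHasDD, hc] using hdd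
      have := ih hdd'
      simp only [pvRep, if_neg h, List.length_cons] at this ⊢
      omega

theorem pvReplaceGo_eq_rep : ∀ (fuel : Nat) (l acc : List Char), l.length ≤ fuel →
    PySem.Chars.replace.go ['/', '/'] ['/'] fuel l acc = acc.reverse ++ pvRep l := by
  intro fuel
  induction fuel with
  | zero =>
      intro l acc h
      have : l = [] := by cases l <;> simp_all
      subst this; simp [PySem.Chars.replace.go, pvRep]
  | succ n ih =>
      intro l acc h
      match l with
      | [] => simp [PySem.Chars.replace.go, pvRep]
      | [c] =>
          have hp : List.isPrefixOf ['/', '/'] [c] = false := by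
            simp [List.isPrefixOf]
          simp only [PySem.Chars.replace.go, hp]
          rw [ih [] (c :: acc) (by simp)]
          simp [pvRep]
      | c :: d :: t =>
          by_cases hc : c = '/' ∧ d = '/'
          · obtain ⟨h1, h2⟩ := hc; subst h1; subst h2
            have hp : List.isPrefixOf ['/', '/'] ('/' :: '/' :: t) = true := by
              simp [List.isPrefixOf]
            simp only [PySem.Chars.replace.go, hp, if_pos]
            rw [show List.drop ['/','/'].length ('/' :: '/' :: t) = t from rfl]
            rw [ih t _ (by simp at h ⊢; omega)]
            simp [pvRep]
          · have hp : List.isPrefixOf ['/', '/'] (c :: d :: t) = false := by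
              simp [List.isPrefixOf]
              intro e1 e2
              exact hc ⟨e1.symm, e2.symm⟩
            simp only [PySem.Chars.replace.go, hp]
            rw [ih (d :: t) (c :: acc) (by simp at h ⊢; omega)]
            simp [pvRep, hc]

theorem pvReplace_eq_rep (l : List Char) :
    PySem.Chars.replace l ['/', '/'] ['/'] = pvRep l := by
  simp only [PySem.Chars.replace]
  norm_num
  exact pvReplaceGo_eq_rep l.length l [] le_rfl

theorem pvHasDD_iff_infix (l : List Char) : pvHasDD l = true ↔ ['/', '/'] <:+: l := by
  induction l with
  | nil => simp [pvHasDD]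
  | cons c t ih =>
      rw [List.infix_cons_iff]
      cases t with
      | nil => simp [pvHasDD, List.prefix_cons_iff]
      | cons d u =>
          simp only [pvHasDD, Bool.or_eq_true, Bool.and_eq_true, decide_eq_true_eq, ih]
          constructor
          · rintro (⟨h1, h2⟩ | h)
            · subst h1; subst h2; exact Or.inl ⟨u, rfl⟩
            · exact Or.inr h
          · rintro (h | h)
            · left
              rcases h with ⟨r, hr⟩
              simp at hr
              exact ⟨hr.1.symm, hr.2.1.symm⟩
            · exact Or.inr h

theorem pvIsIn_iff_hasDD (l : List Char) :
    PySem.Chars.isIn ['/', '/'] l = true ↔ pvHasDD l = true := by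
  rw [PySem.Chars.isIn_iff_infix, pvHasDD_iff_infix]

-- literal port of A's inner while loop (collapse double slashes until none remain)
def pvCollapse (l : List Char) : List Char :=
  if h : PySem.Chars.isIn ['/', '/'] l = true then
    pvCollapse (PySem.Chars.replace l ['/', '/'] ['/'])
  else l
termination_by l.length
decreasing_by
  rw [pvReplace_eq_rep]
  exact pvRep_shrink l ((pvIsIn_iff_hasDD l).mp h)

-- literal port of A's second while loop (strip leading slashes, empty means done)
def pvStrip : List Char → List Char
  | [] => []
  | c :: t => if c = '/' then (if t = [] then [] else pvStrip t) else c :: t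

def folder_name_format (folder_name : String) : String :=
  if folder_name = "" then ""                                   -- the emptiness guard
  else
    let l := folder_name.toList
    let l := if PySem.List.pyGet? l (-1) ≠ some '/' then l ++ ['/'] else l   -- append trailing slash if missing
    if l ≠ ['/'] then String.ofList (pvStrip (pvCollapse l))        -- the two while loops, then return
    else ""

-- ===== PORT B =====
def folder_name_format_alt (folder_name : String) : String :=
  if folder_name = "" then ""
  else
    let parts := (PySem.Chars.splitOn folder_name.toList ['/']).filter (fun p => p ≠ [])
    if parts ≠ [] then String.ofList (PySem.Chars.join ['/'] parts ++ ['/'])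
    else ""

-- ===== PRECONDITION & SPEC =====
def Spec_folder_name_format (folder_name : String) (out : String) : Prop := out = folder_name_format_alt folder_name
instance (folder_name : String) (out : String) : Decidable (Spec_folder_name_format folder_name out) := by unfold Spec_folder_name_format; infer_instance

-- ===== CLAIM (what is proved, stated in full; the proofs are below) =====
def Claim_equal_folder_name_format : Prop := ∀ (folder_name : String), Dom_folder_name_format folder_name → Spec_folder_name_format folder_name (folder_name_format folder_name)

-- ===== LEMMAS AND PROOFS =====

-- proof-level model of splitting on slashes
def pvSp : List Char → List (List Char)
  | [] => [[]]
  | c :: t => if c = '/' then [] :: pvSp t else (c :: (pvSp t).headI) :: (pvSp t).tail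

theorem pvSp_ne_nil (l : List Char) : pvSp l ≠ [] := by
  cases l with
  | nil => simp [pvSp]
  | cons c t => unfold pvSp; split <;> simp

theorem pvSp_cons_form (l : List Char) : pvSp l = (pvSp l).headI :: (pvSp l).tail := by
  cases h : pvSp l with
  | nil => exact absurd h (pvSp_ne_nil l)
  | cons a r => simp

theorem pvSplitOnGo_eq_sp : ∀ (fuel : Nat) (l cur : List Char) (acc : List (List Char)),
    l.length ≤ fuel →
    PySem.Chars.splitOn.go ['/'] fuel l cur acc
      = acc.reverse ++ ((cur.reverse ++ (pvSp l).headI) :: (pvSp l).tail) := by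
  intro fuel
  induction fuel with
  | zero =>
      intro l cur acc h
      have : l = [] := by cases l <;> simp_all
      subst this
      simp [PySem.Chars.splitOn.go, pvSp]
  | succ n ih =>
      intro l cur acc h
      match l with
      | [] => simp [PySem.Chars.splitOn.go, pvSp]
      | c :: t =>
          by_cases hc : c = '/'
          · subst hc
            have hp : List.isPrefixOf ['/'] ('/' :: t) = true := by simp [List.isPrefixOf]
            simp only [PySem.Chars.splitOn.go, hp, if_pos]
            rw [show List.drop ['/'].length ('/' :: t) = t from rfl]
            rw [ih t [] _ (by simp at h ⊢; omega)]
            simp [pvSp]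
            rw [← pvSp_cons_form]
          · have hp : List.isPrefixOf ['/'] (c :: t) = false := by
              simp [List.isPrefixOf]
              exact fun e => hc e.symm
            simp only [PySem.Chars.splitOn.go, hp]
            rw [ih t (c :: cur) acc (by simp at h ⊢; omega)]
            simp [pvSp, hc]
theorem pvSplitOn_eq_sp (l : List Char) : PySem.Chars.splitOn l ['/'] = pvSp l := by
  simp only [PySem.Chars.splitOn]
  rw [pvSplitOnGo_eq_sp (l.length + 1) l [] [] (by omega)]
  simp [← pvSp_cons_form]

-- the nonempty segments
def pvParts (l : List Char) : List (List Char) := (pvSp l).filter (fun p => p ≠ [])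

theorem pvParts_slash_cons (t : List Char) : pvParts ('/' :: t) = pvParts t := by
  simp [pvParts, pvSp]

-- appending the trailing slash does not change the nonempty segments
theorem pvSp_append_slash (l : List Char) : pvSp (l ++ ['/']) = pvSp l ++ [[]] := by
  induction l with
  | nil => simp [pvSp]
  | cons c t ih =>
      by_cases hc : c = '/'
      · subst hc; simp [pvSp, ih]
      · simp only [List.cons_append, pvSp, hc, if_neg, ih]
        rw [pvSp_cons_form t]
        simp

theorem pvParts_append_slash (l : List Char) : pvParts (l ++ ['/']) = pvParts l := by
  simp [pvParts, pvSp_append_slash]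

-- small helpers ------------------------------------------------------------

theorem pvGetLast?_cons (c : Char) (l : List Char) (h : l ≠ []) :
    (c :: l).getLast? = l.getLast? := by
  cases l with
  | nil => exact absurd rfl h
  | cons d t => exact List.getLast?_cons_cons

theorem pvRep_ne_nil (l : List Char) (h : l ≠ []) : pvRep l ≠ [] := by
  cases l with
  | nil => exact absurd rfl h
  | cons c t =>
      cases t with
      | nil => simp [pvRep]
      | cons d u => unfold pvRep; split <;> simp

theorem pvSp_slash (t : List Char) : pvSp ('/' :: t) = [] :: pvSp t := by simp [pvSp]

theorem pvSp_cons (c : Char) (t : List Char) (h : c ≠ '/') :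
    pvSp (c :: t) = (c :: (pvSp t).headI) :: (pvSp t).tail := by simp [pvSp, h]

theorem pvParts_cons (c : Char) (t : List Char) (h : c ≠ '/') :
    pvParts (c :: t) = (c :: (pvSp t).headI) :: ((pvSp t).tail.filter (fun p => p ≠ [])) := by
  simp [pvParts, pvSp_cons c t h, List.filter_cons]

theorem pvJoin_cons (c : Char) (a : List Char) (r : List (List Char)) :
    PySem.Chars.join ['/'] ((c :: a) :: r) = c :: PySem.Chars.join ['/'] (a :: r) := by
  cases r with
  | nil => simp [PySem.Chars.join_singleton]
  | cons q rest => rw [PySem.Chars.join_cons_cons, PySem.Chars.join_cons_cons]; simp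

-- one replace pass preserves the nonempty segments, the head segment and the tail segments
theorem pvRep_parts (l : List Char) :
    pvParts (pvRep l) = pvParts l
      ∧ (pvSp (pvRep l)).headI = (pvSp l).headI
      ∧ ((pvSp (pvRep l)).tail.filter (fun p => p ≠ [])) = ((pvSp l).tail.filter (fun p => p ≠ [])) := by
  induction l using pvRep.induct with
  | case1 => exact ⟨rfl, rfl, rfl⟩
  | case2 c => exact ⟨rfl, rfl, rfl⟩
  | case3 c d t h ih =>
      obtain ⟨h1, h2⟩ := h; subst h1; subst h2
      have e : pvRep ('/' :: '/' :: t) = '/' :: pvRep t := by simp [pvRep]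
      refine ⟨?_, ?_, ?_⟩
      · rw [e, pvParts_slash_cons, pvParts_slash_cons, pvParts_slash_cons, ih.1]
      · rw [e, pvSp_slash, pvSp_slash]; rfl
      · rw [e, pvSp_slash, pvSp_slash, pvSp_slash]
        show pvParts (pvRep t) = pvParts ('/' :: t)
        rw [pvParts_slash_cons, ih.1]
  | case4 c d t h ih =>
      have e : pvRep (c :: d :: t) = c :: pvRep (d :: t) := by simp [pvRep, h]
      by_cases hc : c = '/'
      · subst hc
        refine ⟨?_, ?_, ?_⟩
        · rw [e, pvParts_slash_cons, pvParts_slash_cons, ih.1]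
        · rw [e, pvSp_slash, pvSp_slash]; rfl
        · rw [e, pvSp_slash, pvSp_slash]
          show pvParts (pvRep (d :: t)) = pvParts (d :: t)
          exact ih.1
      · have hne : pvRep (d :: t) ≠ [] := pvRep_ne_nil _ (by simp)
        refine ⟨?_, ?_, ?_⟩
        · rw [e, pvParts_cons c _ hc, pvParts_cons c _ hc, ih.2.1, ih.2.2]
        · rw [e, pvSp_cons c _ hc, pvSp_cons c _ hc, ih.2.1]
          rfl
        · rw [e, pvSp_cons c _ hc, pvSp_cons c _ hc]
          simpa using ih.2.2

theorem pvRep_getLast? (l : List Char) : (pvRep l).getLast? = l.getLast? := by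
  induction l using pvRep.induct with
  | case1 => rfl
  | case2 c => rfl
  | case3 c d t h ih =>
      obtain ⟨h1, h2⟩ := h; subst h1; subst h2
      have e : pvRep ('/' :: '/' :: t) = '/' :: pvRep t := by simp [pvRep]
      rw [e]
      cases ht : t with
      | nil => simp [pvRep]
      | cons f u =>
          rw [pvGetLast?_cons _ _ (by rw [← ht]; exact pvRep_ne_nil t (by simp [ht])), ← ht, ih,
            List.getLast?_cons_cons, ht]
          exact List.getLast?_cons_cons.symm
  | case4 c d t h ih =>
      have e : pvRep (c :: d :: t) = c :: pvRep (d :: t) := by simp [pvRep, h]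
      rw [e, pvGetLast?_cons _ _ (pvRep_ne_nil _ (by simp)), ih, List.getLast?_cons_cons]

-- the collapse loop: same segments, same last char, and no double slash left
theorem pvCollapse_parts (l : List Char) : pvParts (pvCollapse l) = pvParts l := by
  induction l using pvCollapse.induct with
  | case1 l h ih =>
      rw [pvCollapse, dif_pos h, ih, pvReplace_eq_rep, (pvRep_parts l).1]
  | case2 l h => rw [pvCollapse, dif_neg h]

theorem pvCollapse_getLast? (l : List Char) : (pvCollapse l).getLast? = l.getLast? := by
  induction l using pvCollapse.induct with
  | case1 l h ih =>
      rw [pvCollapse, dif_pos h, ih, pvReplace_eq_rep, pvRep_getLast?]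
  | case2 l h => rw [pvCollapse, dif_neg h]

theorem pvCollapse_noDD (l : List Char) : pvHasDD (pvCollapse l) = false := by
  induction l using pvCollapse.induct with
  | case1 l h ih => rw [pvCollapse, dif_pos h]; exact ih
  | case2 l h =>
      rw [pvCollapse, dif_neg h]
      cases hdd : pvHasDD l with
      | false => rfl
      | true => exact absurd ((pvIsIn_iff_hasDD l).mpr hdd) h

-- recursion skeleton that looks two characters deep (proof scaffolding for pvCrux)
def pvTwo : List Char → Bool
  | [] => true
  | [_] => true
  | _ :: d :: t => pvTwo t && pvTwo (d :: t)

-- crux: a nonempty slash-terminated, not slash-headed string without double slashes is the join of its parts plus a slash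
theorem pvCrux (l : List Char) (hdd : pvHasDD l = false) (hlast : l.getLast? = some '/')
    (hhead : l.head? ≠ some '/') (hne : l ≠ []) :
    pvParts l ≠ [] ∧ PySem.Chars.join ['/'] (pvParts l) ++ ['/'] = l := by
  induction l using pvTwo.induct with
  | case1 => exact absurd rfl hne
  | case2 c =>
      exfalso
      apply hhead
      simpa using hlast
  | case3 c d t ih1 ih2 =>
      have hc : c ≠ '/' := by
        intro h; exact hhead (by simp [h])
      have hdd' : pvHasDD (d :: t) = false := by
        simpa [pvHasDD] using (by simpa [pvHasDD] using hdd : _ ∧ _).2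
      have hlast' : (d :: t).getLast? = some '/' := by
        rw [← List.getLast?_cons_cons (a := c)]; exact hlast
      by_cases hd : d = '/'
      · subst hd
        have hth : t.head? ≠ some '/' := by
          cases t with
          | nil => simp
          | cons f u =>
              simp only [pvHasDD] at hdd'
              simp at hdd'
              simp [hdd'.1]
        cases ht : t with
        | nil =>
            constructor
            · simp [pvParts_cons c _ hc, pvSp_slash, pvSp]
            · simp [pvParts_cons c _ hc, pvSp_slash, pvSp, PySem.Chars.join_singleton]
        | cons f u =>
            rw [← ht]
            have htne : t ≠ [] := by simp [ht]
            have hlt : t.getLast? = some '/' := by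
              rw [← pvGetLast?_cons '/' t htne]; exact hlast'
            have hddt : pvHasDD t = false := by
              rw [ht]
              rw [ht] at hdd'
              simp only [pvHasDD, Bool.or_eq_false_iff] at hdd'
              exact hdd'.2
            obtain ⟨hp, hj⟩ := ih1 hddt hlt hth htne
            have hparts : pvParts (c :: '/' :: t) = [c] :: pvParts t := by
              rw [pvParts_cons c _ hc, pvSp_slash]
              show ([c] :: (pvSp t).filter (fun p => p ≠ [])) = [c] :: pvParts t
              rfl
            constructor
            · simp [hparts]
            · rw [hparts]
              cases hpt : pvParts t with
              | nil => exact absurd hpt hp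
              | cons p ps =>
                  rw [PySem.Chars.join_cons_cons]
                  rw [← hpt]
                  simp only [List.cons_append, List.singleton_append, List.append_assoc]
                  rw [hj]
                  simp
      · have hh' : (d :: t).head? ≠ some '/' := by simpa using hd
        obtain ⟨hp, hj⟩ := ih2 hdd' hlast' hh' (by simp)
        have hsp : pvSp (d :: t) = (d :: (pvSp t).headI) :: (pvSp t).tail := pvSp_cons d t hd
        have hpt : pvParts (d :: t)
            = (d :: (pvSp t).headI) :: ((pvSp t).tail.filter (fun p => p ≠ [])) :=
          pvParts_cons d t hd
        have hheadI : (pvSp (d :: t)).headI = d :: (pvSp t).headI := by rw [hsp]; rfl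
        have htail : (pvSp (d :: t)).tail = (pvSp t).tail := by rw [hsp]; rfl
        have hpl : pvParts (c :: d :: t)
            = (c :: d :: (pvSp t).headI) :: ((pvSp t).tail.filter (fun p => p ≠ [])) := by
          rw [pvParts_cons c _ hc, hheadI, htail]
        constructor
        · simp [hpl]
        · rw [hpl]
          have : PySem.Chars.join ['/'] ((c :: d :: (pvSp t).headI) :: ((pvSp t).tail.filter (fun p => p ≠ [])))
              = c :: PySem.Chars.join ['/'] ((d :: (pvSp t).headI) :: ((pvSp t).tail.filter (fun p => p ≠ []))) :=
            pvJoin_cons c _ _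
          rw [this, ← hpt]
          simp only [List.cons_append]
          rw [hj]

theorem pvGet_neg_one (l : List Char) (h : l ≠ []) :
    PySem.List.pyGet? l (-1) = l.getLast? := by
  have hl : l.length ≠ 0 := by simpa using h
  simp only [PySem.List.pyGet?, PySem.List.pyIdx?]
  rw [List.getLast?_eq_getElem?]
  have h1 : ¬ (0 : Int) ≤ -1 := by omega
  have h2 : (-(l.length : Int) ≤ -1) := by omega
  simp only [if_neg h1, if_pos h2, Option.bind]
  norm_num

-- ===== VERDICT (by name: the statement is the Claim_ definition above) =====
theorem folder_name_format_spec : Claim_equal_folder_name_format := by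
  intro s _
  unfold Spec_folder_name_format folder_name_format folder_name_format_alt
  by_cases hs : s = ""
  · simp [hs]
  · have hl0 : s.toList ≠ [] := fun h => hs (String.toList_eq_nil_iff.mp h)
    simp only [if_neg hs]
    rw [pvSplitOn_eq_sp]
    set l0 := s.toList with hl0def
    set l1 := (if PySem.List.pyGet? l0 (-1) ≠ some '/' then l0 ++ ['/'] else l0) with hl1
    have h1 : l1.getLast? = some '/' := by
      rw [hl1]
      split
      · exact List.getLast?_concat
      · next hgl => rw [← pvGet_neg_one l0 hl0]; exact Decidable.not_not.mp hgl
    have h2 : pvParts l1 = pvParts l0 := by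
      rw [hl1]; split
      · exact pvParts_append_slash l0
      · rfl
    have hBparts : (pvSp l0).filter (fun p => p ≠ []) = pvParts l0 := rfl
    rw [hBparts]
    by_cases hone : l1 = ['/']
    · simp only [hone, if_neg (by simp : ¬ (['/'] : List Char) ≠ ['/'])]
      have : pvParts l0 = [] := by
        rw [← h2, hone]
        rfl
      simp [this]
    · simp only [if_pos (by exact hone : l1 ≠ ['/'])]
      have hcparts : pvParts (pvCollapse l1) = pvParts l0 := by
        rw [pvCollapse_parts, h2]
      have hclast : (pvCollapse l1).getLast? = some '/' := by
        rw [pvCollapse_getLast?, h1]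
      have hcnodd : pvHasDD (pvCollapse l1) = false := pvCollapse_noDD l1
      cases hc : pvCollapse l1 with
      | nil => rw [hc] at hclast; simp at hclast
      | cons e rest =>
          rw [hc] at hcparts hclast hcnodd
          by_cases he : e = '/'
          · subst he
            cases hrest : rest with
            | nil =>
                rw [hrest] at hcparts
                have hp0 : pvParts l0 = [] := by rw [← hcparts]; rfl
                simp [pvStrip, hrest, hp0]
            | cons f r =>
                rw [hrest] at hcparts hclast hcnodd
                have hf : f ≠ '/' := by
                  intro hfe
                  rw [hfe] at hcnodd
                  simp [pvHasDD] at hcnodd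
                have hstrip : pvStrip ('/' :: f :: r) = f :: r := by
                  simp [pvStrip, hf]
                have hlast' : (f :: r).getLast? = some '/' := by
                  rw [← List.getLast?_cons_cons (a := '/')]; exact hclast
                have hdd' : pvHasDD (f :: r) = false := by
                  simpa [pvHasDD] using (by simpa [pvHasDD] using hcnodd : _ ∧ _).2
                obtain ⟨hpne, hjoin⟩ := pvCrux (f :: r) hdd' hlast' (by simpa using hf) (by simp)
                have hpl0 : pvParts l0 = pvParts (f :: r) := by
                  rw [← hcparts, pvParts_slash_cons]
                rw [hstrip, if_pos (by rw [hpl0]; exact hpne)]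
                rw [hpl0, hjoin]
          · have hdd0 : pvHasDD (e :: rest) = false := hcnodd
            obtain ⟨hpne, hjoin⟩ := pvCrux (e :: rest) hdd0 hclast (by simpa using he) (by simp)
            have hstrip : pvStrip (e :: rest) = e :: rest := by simp [pvStrip, he]
            rw [hstrip, if_pos (hcparts ▸ hpne), ← hcparts, hjoin]
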